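-- pv_equiv track=rewrite | github.com/chan0park/PCoNMT | src/get_phrases.py | convert_to_lookup_dict
-- ===== SOURCE A (Python) =====
-- def convert_to_lookup_dict(phrase_filtered):
--     res = {}
--     for phrase in phrase_filtered.keys():
--         words = phrase.split("_")
--         try:
--             res[words[0]].add(phrase)
--         except:
--             res[words[0]] = set([phrase])
--     return res
-- ===== SOURCE B (Python) =====
-- def convert_to_lookup_dict(phrase_filtered):
--     pairs = [(p.split("_")[0], p) for p in phrase_filtered.keys()]
--     firsts = list(dict.fromkeys(w for w, _ in pairs))
--     return {w: {p for w2, p in pairs if w2 == w} for w in firsts}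
-- ===== Notes on version B (the rewrite author's own statement) =====
-- stated objective: alternative
-- what changed: Replaces A's single pass that grows a dict of sets via try/except per phrase with a two-phase group-by: split each phrase once into (first-word, phrase) pairs, compute the ordered distinct first words with dict.fromkeys, then build each group by one set comprehension filtering the pair list; trades A's single pass for a per-word scan.
import Mathlib
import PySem

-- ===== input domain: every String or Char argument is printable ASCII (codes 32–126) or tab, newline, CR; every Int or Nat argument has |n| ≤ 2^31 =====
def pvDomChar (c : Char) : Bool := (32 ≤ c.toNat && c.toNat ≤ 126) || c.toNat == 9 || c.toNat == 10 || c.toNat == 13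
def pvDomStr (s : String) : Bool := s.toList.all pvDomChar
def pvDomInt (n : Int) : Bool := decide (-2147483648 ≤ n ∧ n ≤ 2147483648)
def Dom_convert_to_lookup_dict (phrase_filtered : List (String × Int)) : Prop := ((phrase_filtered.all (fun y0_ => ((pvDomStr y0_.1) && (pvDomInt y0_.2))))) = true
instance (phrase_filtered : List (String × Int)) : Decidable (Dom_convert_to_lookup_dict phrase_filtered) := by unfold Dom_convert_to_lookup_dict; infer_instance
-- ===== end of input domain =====

-- B replaces A's incremental try/except dict-of-sets build with a two-phase group-by
-- (ordered distinct first words, then one filtered set per word): an alternative that trades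
-- A's single pass for a per-word scan (O(k*n) for k distinct first words; not faster).


-- ===== PORT A =====
-- phrase.split("_")[0]; exact: split? with the nonempty separator "_" always returns `some` of a
-- nonempty list, so the getD default and the index 0 lookup never see the fallback.
def pvFirstWord (phrase : String) : String :=
  let words := (PySem.Str.split? phrase "_").getD []
  PySem.List.pyGetD words 0 ""

-- the loop body of A: res[words[0]].add(phrase), except KeyError → res[words[0]] = set([phrase])
def pvStepA (res : PySem.Dict String (PySem.Set String)) (phrase : String) :
    PySem.Dict String (PySem.Set String) :=
  let w0 := pvFirstWord phrase
  match res.get? w0 with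
  | some s => res.insert w0 (PySem.Set.add s phrase)
  | none   => res.insert w0 (PySem.Set.ofList [phrase])

def convert_to_lookup_dict (phrase_filtered : List (String × Int)) : List (String × List String) :=
  ((PySem.Dict.ofList phrase_filtered).keys.foldl pvStepA PySem.Dict.empty).items

-- ===== PORT B =====
def convert_to_lookup_dict_alt (phrase_filtered : List (String × Int)) : List (String × List String) :=
  let pairs := (PySem.Dict.ofList phrase_filtered).keys.map (fun p => (pvFirstWord p, p))
  let firsts := PySem.List.dedup (pairs.map (fun wp => wp.1))
  (PySem.Dict.ofList (firsts.map (fun w =>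
    (w, PySem.Set.ofList ((pairs.filter (fun wp => wp.1 == w)).map (fun wp => wp.2)))))).items

-- ===== PRECONDITION & SPEC =====
def Spec_convert_to_lookup_dict (phrase_filtered : List (String × Int)) (out : List (String × List String)) : Prop := out = convert_to_lookup_dict_alt phrase_filtered
instance (phrase_filtered : List (String × Int)) (out : List (String × List String)) : Decidable (Spec_convert_to_lookup_dict phrase_filtered out) := by unfold Spec_convert_to_lookup_dict; infer_instance

-- ===== CLAIM (what is proved, stated in full; the proofs are below) =====
def Claim_equal_convert_to_lookup_dict : Prop := ∀ (phrase_filtered : List (String × Int)), Dom_convert_to_lookup_dict phrase_filtered → Spec_convert_to_lookup_dict phrase_filtered (convert_to_lookup_dict phrase_filtered)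

-- ===== LEMMAS AND PROOFS =====

-- A's loop body is an insert at the key pvFirstWord phrase (the two branches only differ in the value)
theorem pvStepA_eq_insert :
    pvStepA = fun (res : PySem.Dict String (PySem.Set String)) phrase =>
      res.insert (pvFirstWord phrase)
        (match res.get? (pvFirstWord phrase) with
         | some s => PySem.Set.add s phrase
         | none   => PySem.Set.ofList [phrase]) := by
  funext res phrase
  unfold pvStepA
  cases h : res.get? (pvFirstWord phrase) <;> simp [h]

-- collapsing the match: the step always stores old-group ++ [phrase]
theorem pvStepA_getD (res : PySem.Dict String (PySem.Set String)) (phrase : String)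
    (hfresh : ∀ s, res.get? (pvFirstWord phrase) = some s → phrase ∉ s) :
    pvStepA res phrase = res.insert (pvFirstWord phrase) (res.getD (pvFirstWord phrase) [] ++ [phrase]) := by
  simp only [pvStepA_eq_insert]
  cases h : res.get? (pvFirstWord phrase) with
  | none =>
      rw [PySem.Dict.getD_of_get?_eq_none _ _ h]
      simp [PySem.Set.ofList, PySem.Set.add]
  | some s =>
      rw [PySem.Dict.getD_of_get?_eq_some _ _ h]
      have hp : phrase ∉ s := hfresh s h
      have : PySem.Set.add s phrase = s ++ [phrase] := by
        simp [PySem.Set.add]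
        intro hc
        exact absurd (by simpa using hc) hp
      simp [this]

-- loop invariant: folding A's step over a duplicate-free list of phrases appends, per key w,
-- exactly the phrases whose first word is w, in order
theorem pvFoldA_getD (ks : List String) :
    ∀ (d : PySem.Dict String (PySem.Set String)), ks.Nodup →
      (∀ w s, d.get? w = some s → ∀ p ∈ ks, p ∉ s) →
      ∀ w, (ks.foldl pvStepA d).getD w [] = d.getD w [] ++ ks.filter (fun p => pvFirstWord p == w) := by
  induction ks with
  | nil => intro d _ _ w; simp
  | cons p rest ih =>
      intro d hnd hinv w
      have hfresh : ∀ s, d.get? (pvFirstWord p) = some s → p ∉ s := by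
        intro s hs; exact hinv _ s hs p (by simp)
      rw [List.foldl_cons, pvStepA_getD d p hfresh]
      set d' := d.insert (pvFirstWord p) (d.getD (pvFirstWord p) [] ++ [p]) with hd'
      have hnd' : rest.Nodup := hnd.of_cons
      have hinv' : ∀ w s, d'.get? w = some s → ∀ q ∈ rest, q ∉ s := by
        intro w s hs q hq
        rw [hd', PySem.Dict.get?_insert] at hs
        by_cases hw : w = pvFirstWord p
        · simp only [if_pos hw] at hs
          cases hs
          intro hmem
          rcases List.mem_append.mp hmem with hold | hone
          · cases hgd : d.get? (pvFirstWord p) with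
            | none => rw [PySem.Dict.getD_of_get?_eq_none _ _ hgd] at hold; simp at hold
            | some s0 =>
                rw [PySem.Dict.getD_of_get?_eq_some _ _ hgd] at hold
                exact hinv _ s0 hgd q (by simp [hq]) hold
          · have : q = p := by simpa using hone
            exact (List.nodup_cons.mp hnd).1 (this ▸ hq)
        · simp only [if_neg hw] at hs
          exact hinv w s hs q (by simp [hq])
      rw [ih d' hnd' hinv' w]
      rw [hd', PySem.Dict.getD_insert]
      by_cases hw : w = pvFirstWord p
      · simp [hw]
      · have : (pvFirstWord p == w) = false := by
          simp; exact fun h => hw h.symm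
        simp [hw, this]

-- ===== VERDICT (by name: the statement is the Claim_ definition above) =====
theorem convert_to_lookup_dict_spec : Claim_equal_convert_to_lookup_dict := by
  intro pf _
  unfold Spec_convert_to_lookup_dict convert_to_lookup_dict convert_to_lookup_dict_alt
  set ks := (PySem.Dict.ofList pf).keys with hks
  have hndks : ks.Nodup := PySem.Dict.nodup_keys_ofList pf
  -- A's dict after the loop
  set D := ks.foldl pvStepA PySem.Dict.empty with hD
  have hkeys : D.keys = PySem.Set.ofList (ks.map pvFirstWord) := by
    rw [hD, pvStepA_eq_insert]
    rw [PySem.Dict.keys_foldl_insert_key ks pvFirstWord _ PySem.Dict.empty]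
    rw [PySem.Dict.keys_empty, PySem.Set.ofList_eq_foldl]
    rfl
  have hndD : D.keys.Nodup := by
    rw [hD, pvStepA_eq_insert]
    exact PySem.Dict.nodup_keys_foldl_insert_key ks pvFirstWord _ PySem.Dict.empty
      (by rw [PySem.Dict.keys_empty]; exact List.nodup_nil)
  have hgetD : ∀ w, D.getD w [] = ks.filter (fun p => pvFirstWord p == w) := by
    intro w
    rw [hD, pvFoldA_getD ks PySem.Dict.empty hndks
      (by intro w s hs; rw [PySem.Dict.get?_empty] at hs; cases hs) w]
    rw [PySem.Dict.getD_empty]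
    rfl
  rw [PySem.Dict.items_eq_map_keys D hndD [], hkeys]
  simp only []
  -- normalize B's pair bookkeeping: the key list and each group, back in terms of ks
  have hB2 : ∀ w : String,
      (List.filter (fun wp => wp.1 == w) (ks.map (fun p => (pvFirstWord p, p)))).map
        (fun wp : String × String => wp.2) = ks.filter (fun p => pvFirstWord p == w) := by
    intro w
    rw [List.filter_map, List.map_map]
    simp [Function.comp_def]
  simp only [hB2, List.map_map, Function.comp_def]
  -- B's dict: fresh distinct keys, so its items are the mapped list itself
  have hfirsts : PySem.List.dedup (ks.map pvFirstWord) = PySem.Set.ofList (ks.map pvFirstWord) :=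
    PySem.List.dedup_eq_ofList _
  rw [hfirsts]
  set firsts := PySem.Set.ofList (ks.map pvFirstWord) with hfi
  have hndf : firsts.Nodup := PySem.Set.nodup_ofList _
  have hitemsB : (PySem.Dict.ofList (firsts.map (fun w =>
      (w, PySem.Set.ofList (ks.filter (fun p => pvFirstWord p == w)))))).items
      = firsts.map (fun w => (w, PySem.Set.ofList (ks.filter (fun p => pvFirstWord p == w)))) := by
    have := PySem.Dict.items_foldl_insert_fresh
      (l := firsts.map (fun w => (w, PySem.Set.ofList (ks.filter (fun p => pvFirstWord p == w)))))
      (k := fun a => a.1) (v := fun a => a.2) (d := PySem.Dict.empty)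
      (by intro a _; rw [PySem.Dict.contains_empty])
      (by simp only [List.map_map, Function.comp_def]; simpa using hndf)
    simpa [PySem.Dict.ofList, PySem.Dict.update, PySem.Dict.items, PySem.Dict.empty] using this
  rw [hitemsB]
  apply List.map_congr_left
  intro w _
  rw [hgetD w, PySem.Set.ofList_eq_self_of_nodup _ (hndks.filter _)]
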